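-- pv_equiv track=rewrite | github.com/DinisRosa/ATP_LEBIOM | projeto/projeto/Functions/DataSet_Subdivision.py | all_DOI_path
-- ===== SOURCE A (Python) =====
-- def all_DOI_path(base: list) -> dict:
--     DoiPathDict: dict[str, list[int]] = {}
--     for i, pub in enumerate(base):
--         if 'doi' in pub.keys():
--             doi_key: str = pub['doi'][29:]
--             if doi_key not in DoiPathDict:
--                 DoiPathDict[doi_key] = [i]
--             else:
--                 DoiPathDict[doi_key].append(i)
--     return {k: DoiPathDict[k] for k in sorted(DoiPathDict)}
-- ===== SOURCE B (Python) =====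
-- def all_DOI_path(base: list) -> dict:
--     def key_of(pub):
--         return pub['doi'][29:] if 'doi' in pub.keys() else None
--     keys = sorted({k for k in map(key_of, base) if k is not None})
--     return {k: [i for i, pub in enumerate(base) if key_of(pub) == k]
--             for k in keys}
-- ===== Notes on version B (the rewrite author's own statement) =====
-- stated objective: alternative
-- what changed: Replaces A's single pass that mutates a grouping dict (then re-sorts its keys) by a two-phase plan: first collect the distinct DOI keys into a set and sort them, then build each group by an independent filtered scan over the enumerated input, so no mutable accumulator dict exists.
import Mathlib
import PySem

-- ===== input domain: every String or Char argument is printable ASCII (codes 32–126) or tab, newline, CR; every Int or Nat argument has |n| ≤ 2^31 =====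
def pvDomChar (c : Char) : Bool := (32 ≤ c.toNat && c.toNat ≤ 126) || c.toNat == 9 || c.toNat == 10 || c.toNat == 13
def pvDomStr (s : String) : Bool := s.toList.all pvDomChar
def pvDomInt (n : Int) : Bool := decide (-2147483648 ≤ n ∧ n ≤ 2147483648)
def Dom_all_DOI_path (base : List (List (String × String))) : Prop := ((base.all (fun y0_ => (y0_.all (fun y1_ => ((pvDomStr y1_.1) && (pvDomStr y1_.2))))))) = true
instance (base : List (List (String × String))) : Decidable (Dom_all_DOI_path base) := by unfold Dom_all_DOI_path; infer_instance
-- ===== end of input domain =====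

-- B groups by two phases (sorted key set, then one filtered scan per key) instead of A's
-- mutable grouping dict; alternative decomposition, not faster.

-- ===== PORT A =====
def all_DOI_path (base : List (List (String × String))) : List (String × List Int) :=
  let dict := (PySem.List.enumerate base 0).foldl (fun D p =>
    let d := PySem.Dict.ofList p.2
    if d.contains "doi" then
      let doi_key := PySem.Str.slice (d.getD "doi" "") (some 29) none
      if D.contains doi_key = false then D.insert doi_key [p.1]
      else D.modify doi_key [] (fun xs => xs ++ [p.1])
    else D) PySem.Dict.empty
  (PySem.List.sorted dict.keys (fun x => x) false).map (fun k => (k, dict.getD k []))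

-- ===== PORT B =====
-- B-side helper: key_of(pub) — pub['doi'][29:] if 'doi' in pub.keys() else None
def pvKey? (pub : List (String × String)) : Option String :=
  let d := PySem.Dict.ofList pub
  if d.contains "doi" then some (PySem.Str.slice (d.getD "doi" "") (some 29) none) else none

def all_DOI_path_alt (base : List (List (String × String))) : List (String × List Int) :=
  let keys := PySem.List.sorted (PySem.Set.ofList (base.filterMap pvKey?)) (fun x => x) false
  keys.map (fun k =>
    (k, ((PySem.List.enumerate base 0).filter (fun p => pvKey? p.2 == some k)).map (fun p => p.1)))

-- ===== PRECONDITION & SPEC =====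
def Spec_all_DOI_path (base : List (List (String × String))) (out : List (String × List Int)) : Prop := out = all_DOI_path_alt base
instance (base : List (List (String × String))) (out : List (String × List Int)) : Decidable (Spec_all_DOI_path base out) := by unfold Spec_all_DOI_path; infer_instance

-- ===== CLAIM (what is proved, stated in full; the proofs are below) =====
def Claim_equal_all_DOI_path : Prop := ∀ (base : List (List (String × String))), Dom_all_DOI_path base → Spec_all_DOI_path base (all_DOI_path base)

-- ===== LEMMAS AND PROOFS =====

theorem pv_step_getD (D : PySem.Dict String (List Int)) (i : Int) (x : List (String × String)) (k : String) :
    ((fun D (p : Int × List (String × String)) =>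
      let d := PySem.Dict.ofList p.2
      if d.contains "doi" then
        let doi_key := PySem.Str.slice (d.getD "doi" "") (some 29) none
        if D.contains doi_key = false then D.insert doi_key [p.1]
        else D.modify doi_key [] (fun xs => xs ++ [p.1])
      else D) D (i, x)).getD k []
    = D.getD k [] ++ (if pvKey? x == some k then [i] else []) := by
  simp only [pvKey?]
  by_cases hd : (PySem.Dict.ofList x).contains "doi"
  · simp only [hd, if_true]
    cases hc : D.contains (PySem.Str.slice ((PySem.Dict.ofList x).getD "doi" "") (some 29) none) with
    | true =>
      rw [if_neg (by simp), PySem.Dict.getD_modify]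
      by_cases hk : k = PySem.Str.slice ((PySem.Dict.ofList x).getD "doi" "") (some 29) none
      · rw [if_pos hk, hk]; simp
      · rw [if_neg hk]; simp [Ne.symm hk]
    | false =>
      rw [if_pos rfl, PySem.Dict.getD_insert]
      by_cases hk : k = PySem.Str.slice ((PySem.Dict.ofList x).getD "doi" "") (some 29) none
      · rw [if_pos hk, hk, PySem.Dict.getD_of_not_contains D _ hc]; simp
      · rw [if_neg hk]; simp [Ne.symm hk]
  · simp [hd]

theorem pv_step_keys (D : PySem.Dict String (List Int)) (i : Int) (x : List (String × String)) :
    ((fun D (p : Int × List (String × String)) =>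
      let d := PySem.Dict.ofList p.2
      if d.contains "doi" then
        let doi_key := PySem.Str.slice (d.getD "doi" "") (some 29) none
        if D.contains doi_key = false then D.insert doi_key [p.1]
        else D.modify doi_key [] (fun xs => xs ++ [p.1])
      else D) D (i, x)).keys
    = (match pvKey? x with
       | some key => PySem.Set.add D.keys key
       | none => D.keys) := by
  simp only [pvKey?]
  by_cases hd : (PySem.Dict.ofList x).contains "doi"
  · simp only [hd, if_true]
    cases hc : D.contains (PySem.Str.slice ((PySem.Dict.ofList x).getD "doi" "") (some 29) none) with
    | true =>
      rw [if_neg (by simp), PySem.Dict.keys_modify, PySem.Dict.keys_insert_of_contains _ _ hc]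
      simp [PySem.Set.add, (PySem.Dict.contains_iff_mem_keys D _).1 hc]
    | false =>
      rw [if_pos rfl, PySem.Dict.keys_insert_of_not_contains _ _ hc]
      have hm : PySem.Str.slice ((PySem.Dict.ofList x).getD "doi" "") (some 29) none ∉ D.keys := by
        intro h
        rw [(PySem.Dict.contains_iff_mem_keys D _).2 h] at hc
        exact Bool.noConfusion hc
      simp [PySem.Set.add, hm]
  · simp [hd]

theorem pv_getD_fold (base : List (List (String × String))) :
    ∀ (s : Int) (D : PySem.Dict String (List Int)) (k : String),
    ((PySem.List.enumerate base s).foldl (fun D p =>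
      let d := PySem.Dict.ofList p.2
      if d.contains "doi" then
        let doi_key := PySem.Str.slice (d.getD "doi" "") (some 29) none
        if D.contains doi_key = false then D.insert doi_key [p.1]
        else D.modify doi_key [] (fun xs => xs ++ [p.1])
      else D) D).getD k []
    = D.getD k [] ++ ((PySem.List.enumerate base s).filter (fun p => pvKey? p.2 == some k)).map (fun p => p.1) := by
  induction base with
  | nil => intro s D k; simp [PySem.List.enumerate_nil]
  | cons x xs ih =>
    intro s D k
    rw [PySem.List.enumerate_cons]
    simp only [List.foldl_cons, List.filter_cons]
    rw [ih, pv_step_getD D s x k]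
    by_cases h : pvKey? x == some k
    · simp [h]
    · simp [h]

theorem pv_keys_fold (base : List (List (String × String))) :
    ∀ (s : Int) (D : PySem.Dict String (List Int)),
    ((PySem.List.enumerate base s).foldl (fun D p =>
      let d := PySem.Dict.ofList p.2
      if d.contains "doi" then
        let doi_key := PySem.Str.slice (d.getD "doi" "") (some 29) none
        if D.contains doi_key = false then D.insert doi_key [p.1]
        else D.modify doi_key [] (fun xs => xs ++ [p.1])
      else D) D).keys
    = PySem.Set.update D.keys (base.filterMap pvKey?) := by
  induction base with
  | nil => intro s D; simp [PySem.List.enumerate_nil, PySem.Set.update]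
  | cons x xs ih =>
    intro s D
    rw [PySem.List.enumerate_cons]
    simp only [List.foldl_cons, List.filterMap_cons]
    rw [ih, pv_step_keys D s x]
    cases h : pvKey? x with
    | none => simp [PySem.Set.update]
    | some key => simp [PySem.Set.update]

theorem pv_keys_eq (base : List (List (String × String))) :
    PySem.Set.update (PySem.Dict.empty : PySem.Dict String (List Int)).keys (base.filterMap pvKey?)
    = PySem.Set.ofList (base.filterMap pvKey?) := by
  rw [PySem.Dict.keys_empty, PySem.Set.ofList_eq_foldl]
  rfl

-- ===== VERDICT (by name: the statement is the Claim_ definition above) =====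
theorem all_DOI_path_spec : Claim_equal_all_DOI_path := by
  intro base _
  unfold Spec_all_DOI_path all_DOI_path all_DOI_path_alt
  simp only [pv_keys_fold base 0 PySem.Dict.empty, pv_keys_eq base,
    pv_getD_fold base 0 PySem.Dict.empty, PySem.Dict.getD_empty, List.nil_append]
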